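-- pv_equiv track=rewrite | github.com/22f3000982/MauryaHub | MauryaHub/app.py | merge_courses
-- ===== SOURCE A (Python) =====
-- def merge_courses(static_courses, supabase_courses):
--     """Merge course lists with Supabase as the source of truth and SQLite as fallback."""
--     merged = {}
--
--     for course in static_courses or []:
--         if not course:
--             continue
--         merged[course[0]] = tuple(course)
--
--     for course in supabase_courses or []:
--         if not course:
--             continue
--         merged[course[0]] = tuple(course)
--
--     return [merged[course_id] for course_id in sorted(merged.keys())]
-- ===== SOURCE B (Python) =====
-- def merge_courses(static_courses, supabase_courses):
--     """Merge course lists with Supabase as the source of truth and SQLite as fallback."""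
--     courses = [c for c in (static_courses or []) if c] + \
--               [c for c in (supabase_courses or []) if c]
--     result = []
--     for key in sorted({c[0] for c in courses}):
--         for c in reversed(courses):
--             if c[0] == key:
--                 result.append(tuple(c))
--                 break
--     return result
-- ===== Notes on version B (the rewrite author's own statement) =====
-- stated objective: alternative
-- what changed: Replaces A's dict accumulation (insert per course, then sort keys and look each up) with a dict-free decomposition: filter and concatenate the two lists, sort the distinct ids, and for each id scan the combined list backwards for the last-written course.
import Mathlib
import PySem

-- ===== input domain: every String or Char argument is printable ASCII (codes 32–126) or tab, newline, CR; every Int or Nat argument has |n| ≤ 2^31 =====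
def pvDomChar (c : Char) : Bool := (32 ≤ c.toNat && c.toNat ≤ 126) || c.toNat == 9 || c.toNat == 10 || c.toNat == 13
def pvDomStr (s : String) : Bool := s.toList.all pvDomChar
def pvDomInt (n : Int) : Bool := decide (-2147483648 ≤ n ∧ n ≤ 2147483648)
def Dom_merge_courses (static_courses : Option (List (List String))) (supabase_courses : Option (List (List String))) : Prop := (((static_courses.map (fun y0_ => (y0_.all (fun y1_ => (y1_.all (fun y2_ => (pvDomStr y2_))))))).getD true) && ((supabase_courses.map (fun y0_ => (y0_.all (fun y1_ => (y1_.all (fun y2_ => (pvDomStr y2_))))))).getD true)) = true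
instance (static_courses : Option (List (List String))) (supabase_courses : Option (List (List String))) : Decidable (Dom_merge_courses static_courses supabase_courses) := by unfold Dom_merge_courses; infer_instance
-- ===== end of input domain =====

-- B replaces A's dict build with: filter + concatenate, sort the distinct ids, then a
-- per-id backward scan for the last-written course (alternative decomposition, no dict).

-- ===== PORT A =====
-- dict merged; course[0] is guarded by the emptiness check, so headD "" is exact;
-- tuple(course) is the identity under the list convention.
def merge_courses (static_courses : Option (List (List String))) (supabase_courses : Option (List (List String))) : List (List String) :=
  let merged0 : PySem.Dict String (List String) :=
    (static_courses.getD []).foldl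
      (fun merged course =>
        if course = [] then merged
        else merged.insert (course.headD "") course) PySem.Dict.empty
  let merged : PySem.Dict String (List String) :=
    (supabase_courses.getD []).foldl
      (fun merged course =>
        if course = [] then merged
        else merged.insert (course.headD "") course) merged0
  (PySem.List.sorted merged.keys (fun k => k) false).map
    (fun course_id => merged.getD course_id [])

-- ===== PORT B =====
-- B: filtered concatenation, sorted distinct ids, backward scan per id (first match of the
-- reversed list = the break-ed inner loop; the loop appends nothing if no match occurs).
def merge_courses_alt (static_courses : Option (List (List String))) (supabase_courses : Option (List (List String))) : List (List String) :=
  let courses : List (List String) :=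
    (static_courses.getD []).filter (fun c => decide (c ≠ []))
      ++ (supabase_courses.getD []).filter (fun c => decide (c ≠ []))
  let keys : List String :=
    PySem.List.sorted (PySem.Set.ofList (courses.map (fun c => c.headD ""))) (fun k => k) false
  keys.foldl
    (fun result key =>
      match courses.reverse.find? (fun c => c.headD "" == key) with
      | some c => result ++ [c]
      | none => result) []

-- ===== PRECONDITION & SPEC =====
def Spec_merge_courses (static_courses : Option (List (List String))) (supabase_courses : Option (List (List String))) (out : List (List String)) : Prop := out = merge_courses_alt static_courses supabase_courses
instance (static_courses : Option (List (List String))) (supabase_courses : Option (List (List String))) (out : List (List String)) : Decidable (Spec_merge_courses static_courses supabase_courses out) := by unfold Spec_merge_courses; infer_instance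

-- ===== CLAIM (what is proved, stated in full; the proofs are below) =====
def Claim_equal_merge_courses : Prop := ∀ (static_courses : Option (List (List String))) (supabase_courses : Option (List (List String))), Dom_merge_courses static_courses supabase_courses → Spec_merge_courses static_courses supabase_courses (merge_courses static_courses supabase_courses)

-- ===== LEMMAS AND PROOFS =====

-- A's loop body ("skip falsy, else insert") is the filtered fold.
theorem pv_foldA_eq_filter (xs : List (List String)) (d : PySem.Dict String (List String)) :
    xs.foldl (fun merged course => if course = [] then merged
              else merged.insert (course.headD "") course) d
      = (xs.filter (fun c => decide (c ≠ []))).foldl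
          (fun merged course => merged.insert (course.headD "") course) d := by
  rw [List.foldl_filter]
  congr 1
  funext merged course
  by_cases h : course = [] <;> simp [h]

-- lookup in the folded dict = first match of the reversed insertion list
theorem pv_get?_fold (L : List (List String)) (d : PySem.Dict String (List String)) (k : String) :
    (L.foldl (fun merged course => merged.insert (course.headD "") course) d).get? k
      = match L.reverse.find? (fun c => c.headD "" == k) with
        | some c => some c
        | none => d.get? k := by
  induction L generalizing d with
  | nil => simp
  | cons c t ih =>
      simp only [List.foldl_cons, ih, List.reverse_cons, List.find?_append]
      cases t.reverse.find? (fun c => c.headD "" == k) with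
      | some c' => simp
      | none =>
          simp only [Option.none_or, List.find?_singleton]
          by_cases h : c.head?.getD "" = k
          · simp [h, PySem.Dict.get?_insert_self]
          · simp [h, PySem.Dict.get?_insert_of_ne _ _ (Ne.symm h)]

-- the body of B's loop, turned into a map once every key has a match
theorem pv_foldB_eq_map (L : List (List String)) (keys : List String) (res : List (List String))
    (h : ∀ k ∈ keys, (L.reverse.find? (fun c => c.headD "" == k)).isSome) :
    keys.foldl
      (fun result key =>
        match L.reverse.find? (fun c => c.headD "" == key) with
        | some c => result ++ [c]
        | none => result) res
      = res ++ keys.map (fun k => (L.reverse.find? (fun c => c.headD "" == k)).getD []) := by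
  induction keys generalizing res with
  | nil => simp
  | cons k t ih =>
      have hk := h k (by simp)
      obtain ⟨c, hc⟩ := Option.isSome_iff_exists.mp hk
      simp only [List.foldl_cons, List.map_cons, hc,
        ih (res ++ [c]) (fun k hk' => h k (by simp [hk'])), Option.getD_some,
        List.append_assoc, List.singleton_append]

theorem merge_courses_eq (static_courses supabase_courses : Option (List (List String))) :
    merge_courses static_courses supabase_courses
      = merge_courses_alt static_courses supabase_courses := by
  unfold merge_courses merge_courses_alt
  set L : List (List String) :=
    (static_courses.getD []).filter (fun c => decide (c ≠ []))
      ++ (supabase_courses.getD []).filter (fun c => decide (c ≠ [])) with hL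
  have hfold :
      (supabase_courses.getD []).foldl
        (fun merged course => if course = [] then merged
          else merged.insert (course.headD "") course)
        ((static_courses.getD []).foldl
          (fun merged course => if course = [] then merged
            else merged.insert (course.headD "") course) PySem.Dict.empty)
      = L.foldl (fun merged course => merged.insert (course.headD "") course)
          PySem.Dict.empty := by
    rw [pv_foldA_eq_filter, pv_foldA_eq_filter, hL, List.foldl_append]
  simp only [hfold]
  set d := L.foldl (fun merged course => merged.insert (course.headD "") course)
      PySem.Dict.empty with hd
  have hkeys : d.keys = PySem.Set.ofList (L.map (fun c => c.headD "")) := by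
    rw [hd, PySem.Dict.keys_foldl_insert_key]
    simp [PySem.Set.update_nil_left]
  have hsome : ∀ k ∈ PySem.List.sorted (PySem.Set.ofList (L.map (fun c => c.headD "")))
      (fun k => k) false, (L.reverse.find? (fun c => c.headD "" == k)).isSome := by
    intro k hk
    rw [PySem.List.mem_sorted] at hk
    rw [PySem.Set.mem_ofList] at hk
    obtain ⟨c, hcL, hck⟩ := List.mem_map.mp hk
    exact List.find?_isSome.mpr ⟨c, by simp [hcL], by simpa using hck⟩
  rw [pv_foldB_eq_map _ _ _ hsome, List.nil_append, hkeys]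
  apply List.map_congr_left
  intro k _
  rw [PySem.Dict.getD_eq_get?_getD, pv_get?_fold]
  cases L.reverse.find? (fun c => c.headD "" == k) with
  | some c => simp
  | none => simp [PySem.Dict.get?_empty]

-- ===== VERDICT (by name: the statement is the Claim_ definition above) =====
theorem merge_courses_spec : Claim_equal_merge_courses := by
  intro s1 s2 _
  exact merge_courses_eq s1 s2
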